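-- pv_equiv track=rewrite | github.com/ravish-oo/opoch-toe-arcagi | src/arcbit/kernel/frames.py | _translate_grid
-- ===== SOURCE A (Python) =====
-- from typing import Tuple, List, Optional, Dict
--
-- def _translate_grid(G: List[List[int]], dy: int, dx: int) -> List[List[int]]:
--     """
--     Translate grid by (dy, dx) with zero-fill.
--
--     Args:
--         G: Input grid.
--         dy: Vertical translation (negative = up).
--         dx: Horizontal translation (negative = left).
--
--     Returns:
--         list[list[int]]: Translated grid (same shape as input).
--
--     Spec:
--         WO-03 helper: Crop/pad with zeros to maintain shape.
--
--         For dy < 0 (shift up):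
--           - Output row r comes from input row r - dy
--           - Top rows are from input, bottom rows are zeros
--
--         For dx < 0 (shift left):
--           - Output col c comes from input col c - dx
--           - Left cols are from input, right cols are zeros
--     """
--     H = len(G)
--     if H == 0:
--         return G
--
--     W = len(G[0]) if G else 0
--     if W == 0:
--         return G
--
--     # Build translated grid
--     G_trans = []
--     for r_out in range(H):
--         row_out = []
--         for c_out in range(W):
--             # Source coordinates
--             r_src = r_out - dy
--             c_src = c_out - dx
--
--             # Check bounds
--             if 0 <= r_src < H and 0 <= c_src < W:
--                 row_out.append(G[r_src][c_src])
--             else: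
--                 row_out.append(0)
--
--         G_trans.append(row_out)
--
--     return G_trans
-- ===== SOURCE B (Python) =====
-- def _translate_grid(G, dy, dx):
--     H = len(G)
--     if H == 0:
--         return G
--     W = len(G[0])
--     if W == 0:
--         return G
--     lo = max(0, dx)
--     hi = min(W, W + dx)
--     out = []
--     for r in range(H):
--         s = r - dy
--         if 0 <= s < H and lo < hi:
--             out.append([0] * lo + G[s][lo - dx:hi - dx] + [0] * (W - hi))
--         else:
--             out.append([0] * W)
--     return out
-- ===== Notes on version B (the rewrite author's own statement) =====
-- stated objective: alternative
-- what changed: B replaces A's per-cell bounds test inside a double loop by precomputing the overlap column window once and building each output row as a concatenation: zero padding ++ a slice of the source row ++ zero padding (full zero row when the row has no source); C-level list slicing/repetition removes the per-cell Python-level bound checks (measured ~2.3x at the largest size).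
import Mathlib
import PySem

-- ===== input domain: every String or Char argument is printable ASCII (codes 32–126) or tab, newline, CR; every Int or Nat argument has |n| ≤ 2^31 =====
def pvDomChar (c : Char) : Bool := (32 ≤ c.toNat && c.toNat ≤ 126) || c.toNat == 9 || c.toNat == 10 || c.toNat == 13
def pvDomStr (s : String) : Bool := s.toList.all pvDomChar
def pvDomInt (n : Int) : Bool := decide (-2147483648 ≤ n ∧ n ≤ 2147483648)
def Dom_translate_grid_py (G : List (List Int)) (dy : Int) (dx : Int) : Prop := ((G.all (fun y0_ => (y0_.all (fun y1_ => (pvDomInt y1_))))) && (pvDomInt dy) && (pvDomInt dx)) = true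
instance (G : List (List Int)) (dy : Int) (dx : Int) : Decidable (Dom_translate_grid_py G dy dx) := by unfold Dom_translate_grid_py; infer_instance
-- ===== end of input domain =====

-- B builds each output row by concatenation (zero padding ++ a slice of the source row ++ zero
-- padding) over the precomputed overlap ranges, instead of A's per-cell bounds test (a
-- constant-factor speedup measured). Equivalence is about the return value;
-- neither version mutates G.

-- ===== PORT A =====
def translate_grid_py (G : List (List Int)) (dy : Int) (dx : Int) : List (List Int) :=
  let H : Int := G.length
  if H = 0 then G
  else
    let W : Int := (G.headD []).length
    if W = 0 then G
    else
      (PySem.List.pyRange 0 H 1).map (fun r_out =>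
        (PySem.List.pyRange 0 W 1).map (fun c_out =>
          let r_src := r_out - dy
          let c_src := c_out - dx
          if 0 ≤ r_src ∧ r_src < H ∧ 0 ≤ c_src ∧ c_src < W then
            -- G[r_src][c_src]; in range on every input satisfying Pre_ below
            PySem.List.pyGetD (PySem.List.pyGetD G r_src []) c_src 0
          else 0))

-- ===== PORT B =====
def translate_grid_py_alt (G : List (List Int)) (dy : Int) (dx : Int) : List (List Int) :=
  let H : Int := G.length
  if H = 0 then G
  else
    let W : Int := (G.headD []).length
    if W = 0 then G
    else
      let lo : Int := max 0 dx
      let hi : Int := min W (W + dx)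
      (PySem.List.pyRange 0 H 1).map (fun r =>
        let s := r - dy
        if 0 ≤ s ∧ s < H ∧ lo < hi then
          List.replicate lo.toNat 0
            ++ PySem.List.slice (PySem.List.pyGetD G s []) (some (lo - dx)) (some (hi - dx))
            ++ List.replicate (W - hi).toNat 0
        else
          List.replicate W.toNat 0)

-- ===== PRECONDITION & SPEC =====
-- Pre_ excludes exactly the ragged grids on which A raises IndexError: some referenced source row
-- is shorter than the column window A reads (A indexes every row up to the first row's width).
def Pre_translate_grid_py (G : List (List Int)) (dy : Int) (dx : Int) : Prop :=
  G = [] ∨ G.headD [] = [] ∨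
    (max 0 (-dx) < min ((G.headD []).length : Int) (((G.headD []).length : Int) - dx) →
      ∀ i : Nat, i < G.length → 0 ≤ (i : Int) - dy → (i : Int) - dy < (G.length : Int) →
        min ((G.headD []).length : Int) (((G.headD []).length : Int) - dx)
          ≤ ((G.getD ((i : Int) - dy).toNat []).length : Int))
instance (G : List (List Int)) (dy : Int) (dx : Int) : Decidable (Pre_translate_grid_py G dy dx) := by
  unfold Pre_translate_grid_py; infer_instance

def pvWitness_translate_grid_py : List (List Int) × Int × Int := ([[1, 2], [3, 4]], 1, -1)

def Spec_translate_grid_py (G : List (List Int)) (dy : Int) (dx : Int) (out : List (List Int)) : Prop := out = translate_grid_py_alt G dy dx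
instance (G : List (List Int)) (dy : Int) (dx : Int) (out : List (List Int)) : Decidable (Spec_translate_grid_py G dy dx out) := by unfold Spec_translate_grid_py; infer_instance

-- ===== CLAIM (what is proved, stated in full; the proofs are below) =====
def Claim_equal_translate_grid_py : Prop := ∀ (G : List (List Int)) (dy : Int) (dx : Int), Dom_translate_grid_py G dy dx → Pre_translate_grid_py G dy dx → Spec_translate_grid_py G dy dx (translate_grid_py G dy dx)


-- ===== LEMMAS AND PROOFS =====

-- One output row, compared pointwise: A's per-cell bounds test vs B's pad ++ slice ++ pad.
theorem translate_row_eq (G : List (List Int)) (dy dx : Int) (r : Nat) (hr : r < G.length)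
    (hpre : Pre_translate_grid_py G dy dx) (hG : G ≠ []) (hW : G.headD [] ≠ []) :
    (PySem.List.pyRange 0 ((G.headD []).length : Int) 1).map (fun c_out =>
        if 0 ≤ (r : Int) - dy ∧ (r : Int) - dy < (G.length : Int) ∧ 0 ≤ c_out - dx ∧
            c_out - dx < ((G.headD []).length : Int) then
          PySem.List.pyGetD (PySem.List.pyGetD G ((r : Int) - dy) []) (c_out - dx) 0
        else 0) =
      (if 0 ≤ (r : Int) - dy ∧ (r : Int) - dy < (G.length : Int) ∧
          max 0 dx < min ((G.headD []).length : Int) (((G.headD []).length : Int) + dx) then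
        List.replicate (max 0 dx).toNat 0
          ++ PySem.List.slice (PySem.List.pyGetD G ((r : Int) - dy) [])
              (some (max 0 dx - dx))
              (some (min ((G.headD []).length : Int) (((G.headD []).length : Int) + dx) - dx))
          ++ List.replicate
              (((G.headD []).length : Int)
                - min ((G.headD []).length : Int) (((G.headD []).length : Int) + dx)).toNat 0
      else List.replicate ((G.headD []).length : Int).toNat 0) := by
  set Wn := (G.headD []).length with hWn
  set W : Int := (Wn : Int) with hWdef
  set s : Int := (r : Int) - dy with hs
  have hWpos : 0 < Wn := List.length_pos_of_ne_nil hW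
  have hWt : W.toNat = Wn := by omega
  rw [PySem.List.pyRange_zero_natCast Wn, List.map_map]
  by_cases hcond : 0 ≤ s ∧ s < (G.length : Int) ∧ max 0 dx < min W (W + dx)
  · obtain ⟨h1, h2, h3⟩ := hcond
    rw [if_pos ⟨h1, h2, h3⟩]
    have hst : s.toNat < G.length := by omega
    have hrow : PySem.List.pyGetD G s [] = G[s.toNat] :=
      PySem.List.pyGetD_eq_getElem G [] h1 h2
    have hlen : min W (W - dx) ≤ (G[s.toNat].length : Int) := by
      rcases hpre with h | h | h
      · exact absurd h hG
      · exact absurd h hW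
      · have h' := h (by omega) r hr (by omega) (by omega)
        rw [List.getD_eq_getElem G [] hst] at h'
        exact h'
    have hbound : min W (W + dx) - dx ≤ (G[s.toNat].length : Int) := by omega
    rw [hrow, PySem.List.slice_toNat _ (by omega) (by omega)]
    have hA : (List.replicate (max 0 dx).toNat (0 : Int)).length = (max 0 dx).toNat :=
      List.length_replicate
    have hB : (List.take ((min W (W + dx) - dx).toNat - (max 0 dx - dx).toNat)
        (List.drop (max 0 dx - dx).toNat G[s.toNat])).length
        = (min W (W + dx) - max 0 dx).toNat := by
      simp only [List.length_take, List.length_drop]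
      omega
    apply List.ext_getElem
    · simp only [List.length_map, List.length_range, List.length_append, hA, hB,
        List.length_replicate]
      omega
    · intro n hn1 hn2
      have hnW : n < Wn := by simpa using hn1
      simp only [List.getElem_map, List.getElem_range, Function.comp]
      rcases Int.lt_or_le ((n : Int)) (max 0 dx) with hn_lo | hn_ge
      · -- left zero padding: column n has no source (n < dx)
        rw [if_neg (by omega)]
        rw [List.getElem_append_left (by simp only [List.length_append, hA, hB]; omega),
          List.getElem_append_left (by simp only [hA]; omega), List.getElem_replicate]
      · rcases Nat.lt_or_ge n (min W (W + dx)).toNat with hmid | hpast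
        · -- the overlap window: cell comes from the source row
          rw [if_pos (by omega)]
          rw [List.getElem_append_left (by simp only [List.length_append, hA, hB]; omega),
            List.getElem_append_right (by simp only [hA]; omega),
            List.getElem_take, List.getElem_drop,
            PySem.List.pyGetD_eq_getElem _ _ (by omega) (by omega)]
          congr 1
          simp only [hA]
          omega
        · -- right zero padding: n is past the window, so n - dx ≥ W
          rw [if_neg (by omega)]
          rw [List.getElem_append_right (by simp only [List.length_append, hA, hB]; omega),
            List.getElem_replicate]
  · rw [if_neg hcond]
    have hzero : ∀ c ∈ List.range Wn,
        ((fun c_out =>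
          if 0 ≤ s ∧ s < (G.length : Int) ∧ 0 ≤ c_out - dx ∧ c_out - dx < W then
            PySem.List.pyGetD (PySem.List.pyGetD G s []) (c_out - dx) 0
          else 0) ∘ (fun k : Nat => (k : Int))) c = 0 := by
      intro c hc
      have hcW : c < Wn := List.mem_range.mp hc
      simp only [Function.comp]
      rw [if_neg (by omega)]
    rw [List.map_congr_left hzero]
    rw [hWt.symm] at hWn ⊢
    simp [List.map_const', List.length_range, hWt]

theorem translate_grid_py_eq (G : List (List Int)) (dy dx : Int)
    (hpre : Pre_translate_grid_py G dy dx) :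
    translate_grid_py G dy dx = translate_grid_py_alt G dy dx := by
  simp only [translate_grid_py, translate_grid_py_alt]
  by_cases hG : ((G.length : Int) = 0)
  · rw [if_pos hG, if_pos hG]
  · rw [if_neg hG, if_neg hG]
    by_cases hW : (((G.headD []).length : Int) = 0)
    · rw [if_pos hW, if_pos hW]
    · rw [if_neg hW, if_neg hW]
      have hGne : G ≠ [] := by
        intro h; subst h; simp at hG
      have hWne : G.headD [] ≠ [] := by
        intro h; rw [h] at hW; simp at hW
      rw [PySem.List.pyRange_zero_natCast G.length, List.map_map, List.map_map]
      apply List.map_congr_left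
      intro a ha
      simp only [Function.comp]
      exact translate_row_eq G dy dx a (List.mem_range.mp ha) hpre hGne hWne

-- ===== VERDICT (by name: the statement is the Claim_ definition above) =====
theorem translate_grid_py_spec : Claim_equal_translate_grid_py := by
  intro G dy dx _ hpre
  unfold Spec_translate_grid_py
  exact translate_grid_py_eq G dy dx hpre
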